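-- pv_equiv track=rewrite | github.com/Robi2710/Context-Free-Gramar | main.py | membership_abc
-- ===== SOURCE A (Python) =====
-- def membership_abc(s: str) -> bool:
--     if not s or s[0] != 'a':
--         return False
--
--     n = 0
--     while n < len(s) and s[n] == 'a':
--         n += 1
--
--     if s[n:2*n] != 'b' * n:
--         return False
--
--     if s[2*n:3*n] != 'c' * n:
--         return False
--
--     return 3*n == len(s)
-- ===== SOURCE B (Python) =====
-- def membership_abc(s: str) -> bool:
--     # run-length encode s into (char, count) pairs, one pass
--     runs = []
--     for c in s:
--         if runs and runs[-1][0] == c: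
--             runs[-1] = (c, runs[-1][1] + 1)
--         else:
--             runs.append((c, 1))
--     return (len(runs) == 3
--             and [c for c, _ in runs] == ['a', 'b', 'c']
--             and len({n for _, n in runs}) == 1)
-- ===== Notes on version B (the rewrite author's own statement) =====
-- stated objective: idiomatic
-- what changed: Replaced the index-counting while loop plus slice-vs-repeated-string comparisons by a single run-length-encoding pass followed by a fixed check that there are exactly three runs, in the required character order, with one common length.
import Mathlib
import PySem

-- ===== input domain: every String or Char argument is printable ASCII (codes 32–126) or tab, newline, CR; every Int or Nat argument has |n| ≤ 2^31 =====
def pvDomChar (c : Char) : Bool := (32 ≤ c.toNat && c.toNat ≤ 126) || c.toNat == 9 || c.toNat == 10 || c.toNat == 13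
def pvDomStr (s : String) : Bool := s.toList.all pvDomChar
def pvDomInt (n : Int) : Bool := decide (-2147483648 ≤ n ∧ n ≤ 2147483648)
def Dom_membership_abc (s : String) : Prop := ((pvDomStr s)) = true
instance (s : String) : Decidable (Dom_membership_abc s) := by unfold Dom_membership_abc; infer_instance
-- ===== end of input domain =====

-- B replaces A's index-counting while loop and slice comparisons by a single
-- run-length-encoding pass plus a fixed check on the resulting runs (idiomatic; same cost).

-- ===== PORT A =====

-- the index-advancing while loop of A (count the leading run of the first letter)
def pvWhileA (cs : List Char) (n : Nat) : Nat :=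
  if h : n < cs.length then
    if cs[n] = 'a' then pvWhileA cs (n + 1) else n
  else n
termination_by cs.length - n

def pvA (cs : List Char) : Bool :=
  if cs.isEmpty || !(PySem.List.pyGet? cs 0 == some 'a') then false
  else
    let n := pvWhileA cs 0
    if !(PySem.List.slice cs (some (n : Int)) (some ((2 * n : Nat) : Int))
          == List.replicate n 'b') then false
    else if !(PySem.List.slice cs (some ((2 * n : Nat) : Int)) (some ((3 * n : Nat) : Int))
          == List.replicate n 'c') then false
    else 3 * n == cs.length

def membership_abc (s : String) : Bool := pvA s.toList

-- ===== PORT B =====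

-- one step of the run-length-encoding loop of Source B (merge with last run / append a new run)
def pvRleStep (runs : List (Char × Nat)) (c : Char) : List (Char × Nat) :=
  match runs.getLast? with
  | some (c', k) => if c' = c then runs.dropLast ++ [(c, k + 1)] else runs ++ [(c, 1)]
  | none => [(c, 1)]

def pvRle (cs : List Char) : List (Char × Nat) := cs.foldl pvRleStep []

def pvB (cs : List Char) : Bool :=
  let runs := pvRle cs
  decide (runs.length = 3)
    && decide (runs.map Prod.fst = ['a', 'b', 'c'])
    && decide ((PySem.Set.ofList (runs.map Prod.snd)).length = 1)

def membership_abc_alt (s : String) : Bool := pvB s.toList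

-- ===== PRECONDITION & SPEC =====
def Spec_membership_abc (s : String) (out : Bool) : Prop := out = membership_abc_alt s
instance (s : String) (out : Bool) : Decidable (Spec_membership_abc s out) := by unfold Spec_membership_abc; infer_instance

-- ===== CLAIM (what is proved, stated in full; the proofs are below) =====
def Claim_equal_membership_abc : Prop := ∀ (s : String), Dom_membership_abc s → Spec_membership_abc s (membership_abc s)

-- ===== LEMMAS AND PROOFS =====

-- the canonical characterisation both programs decide
def pvIsABC (cs : List Char) : Prop :=
  ∃ n : Nat, 1 ≤ n ∧ cs = List.replicate n 'a' ++ List.replicate n 'b' ++ List.replicate n 'c'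

-- concatenation of the runs gives back the string
def pvExpand (rs : List (Char × Nat)) : List Char := rs.flatMap fun p => List.replicate p.2 p.1

theorem pvWhileA_eq_takeWhile (cs : List Char) (n : Nat) :
    pvWhileA cs n = n + ((cs.drop n).takeWhile (fun c => c = 'a')).length := by
  by_cases h : n < cs.length
  · have hd : cs.drop n = cs[n] :: cs.drop (n + 1) := List.drop_eq_getElem_cons h
    by_cases ha : cs[n] = 'a'
    · rw [pvWhileA]
      simp only [h, dif_pos, ha, if_pos]
      rw [pvWhileA_eq_takeWhile cs (n + 1), hd]
      simp [ha]
      omega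
    · rw [pvWhileA]
      simp only [h, dif_pos, ha]
      rw [hd]
      simp [ha]
  · rw [pvWhileA]
    simp only [h]
    rw [List.drop_eq_nil_of_le (by omega)]
    simp
termination_by cs.length - n

theorem pvSet3_len_one (x y z : Nat) :
    (PySem.Set.ofList [x, y, z]).length = 1 ↔ y = x ∧ z = x := by
  by_cases hy : y = x <;> by_cases hz : z = x <;> by_cases hzy : z = y <;>
    simp_all [PySem.Set.ofList, PySem.Set.add]

theorem pvExpand_step (runs : List (Char × Nat)) (c : Char) :
    pvExpand (pvRleStep runs c) = pvExpand runs ++ [c] := by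
  unfold pvRleStep
  cases h : runs.getLast? with
  | none =>
    rw [List.getLast?_eq_none_iff.mp h]
    simp [pvExpand]
  | some p =>
    obtain ⟨c', k⟩ := p
    obtain ⟨l', rfl⟩ := List.getLast?_eq_some_iff.mp h
    by_cases hc : c' = c
    · subst hc
      simp [pvExpand, List.replicate_succ' (n := k)]
    · simp [pvExpand, hc]

theorem pvExpand_foldl (cs : List Char) (runs : List (Char × Nat)) :
    pvExpand (cs.foldl pvRleStep runs) = pvExpand runs ++ cs := by
  induction cs generalizing runs with
  | nil => simp
  | cons c cs ih => simp [List.foldl_cons, ih, pvExpand_step]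

theorem pvRle_pos (cs : List Char) (runs : List (Char × Nat))
    (h : ∀ p ∈ runs, 1 ≤ p.2) : ∀ p ∈ cs.foldl pvRleStep runs, 1 ≤ p.2 := by
  induction cs generalizing runs with
  | nil => exact h
  | cons c cs ih =>
    refine ih _ ?_
    intro p hp
    unfold pvRleStep at hp
    cases hl : runs.getLast? with
    | none =>
      rw [hl] at hp
      simp at hp
      simp [hp]
    | some q =>
      obtain ⟨c', k⟩ := q
      rw [hl] at hp
      obtain ⟨l', rfl⟩ := List.getLast?_eq_some_iff.mp hl
      by_cases hc : c' = c
      · simp [hc] at hp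
        rcases hp with hp | hp
        · exact h p (List.mem_append_left _ hp)
        · simp [hp]
      · simp [hc] at hp
        rcases hp with hp | hp | hp
        · exact h p (List.mem_append_left _ hp)
        · exact h p (by simp [hp])
        · simp [hp]

theorem pvRle_merge (m : Nat) (rs : List (Char × Nat)) (x : Char) (k : Nat) :
    (List.replicate m x).foldl pvRleStep (rs ++ [(x, k)]) = rs ++ [(x, k + m)] := by
  induction m generalizing k with
  | zero => simp
  | succ m ih =>
    rw [List.replicate_succ, List.foldl_cons]
    have hstep : pvRleStep (rs ++ [(x, k)]) x = rs ++ [(x, k + 1)] := by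
      unfold pvRleStep
      simp
    rw [hstep, ih]
    have : k + 1 + m = k + (m + 1) := by omega
    rw [this]

theorem pvRle_canon (n : Nat) (hn : 1 ≤ n) :
    pvRle (List.replicate n 'a' ++ List.replicate n 'b' ++ List.replicate n 'c')
      = [('a', n), ('b', n), ('c', n)] := by
  obtain ⟨m, rfl⟩ : ∃ m, n = m + 1 := ⟨n - 1, by omega⟩
  unfold pvRle
  rw [List.foldl_append, List.foldl_append]
  have ha : List.foldl pvRleStep [] (List.replicate (m + 1) 'a') = [('a', m + 1)] := by
    rw [List.replicate_succ, List.foldl_cons]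
    have h1 : pvRleStep [] 'a' = [('a', 1)] := by unfold pvRleStep; simp
    rw [h1]
    simpa [Nat.add_comm] using pvRle_merge m [] 'a' 1
  have hb : List.foldl pvRleStep [('a', m + 1)] (List.replicate (m + 1) 'b')
      = [('a', m + 1), ('b', m + 1)] := by
    rw [List.replicate_succ, List.foldl_cons]
    have h1 : pvRleStep [('a', m + 1)] 'b' = [('a', m + 1), ('b', 1)] := by
      unfold pvRleStep; simp
    rw [h1]
    simpa [Nat.add_comm] using pvRle_merge m [('a', m + 1)] 'b' 1
  have hc : List.foldl pvRleStep [('a', m + 1), ('b', m + 1)] (List.replicate (m + 1) 'c')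
      = [('a', m + 1), ('b', m + 1), ('c', m + 1)] := by
    rw [List.replicate_succ, List.foldl_cons]
    have h1 : pvRleStep [('a', m + 1), ('b', m + 1)] 'c'
        = [('a', m + 1), ('b', m + 1), ('c', 1)] := by
      unfold pvRleStep; simp
    rw [h1]
    simpa [Nat.add_comm] using pvRle_merge m [('a', m + 1), ('b', m + 1)] 'c' 1
  rw [ha, hb, hc]

theorem pvTakeWhile_replicate_append (p : Char → Bool) (a : Char) (hp : p a = true)
    (n : Nat) (l : List Char) :
    List.takeWhile p (List.replicate n a ++ l) = List.replicate n a ++ List.takeWhile p l := by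
  induction n with
  | zero => simp
  | succ n ih => simp [List.replicate_succ, hp, ih]

theorem A_iff (cs : List Char) : pvA cs = true ↔ pvIsABC cs := by
  constructor
  · intro h
    simp only [pvA] at h
    by_cases h0 : cs.isEmpty || !(PySem.List.pyGet? cs 0 == some 'a')
    · rw [if_pos h0] at h
      exact absurd h (by decide)
    · rw [if_neg h0] at h
      simp at h0
      obtain ⟨hne, hget⟩ := h0
      replace hne : cs ≠ [] := by simpa [List.isEmpty_iff] using hne
      set n := pvWhileA cs 0 with hn
      split_ifs at h with h1 h2
      -- h1, h2 : the two slice checks hold (negated nots), h : 3*n == len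
      simp only [Bool.not_eq_true', beq_eq_false_iff_ne, ne_eq, Decidable.not_not] at h1 h2
      replace h : 3 * n = cs.length := by simpa using h
      have hnt : n = (cs.takeWhile (fun c => c = 'a')).length := by
        rw [hn, pvWhileA_eq_takeWhile]; simp
      have htw : cs.takeWhile (fun c => c = 'a') = List.replicate n 'a' := by
        rw [List.eq_replicate_iff]
        refine ⟨hnt.symm, fun b hb => ?_⟩
        have := List.mem_takeWhile_imp hb
        simpa using this
      have htake : cs.take n = List.replicate n 'a' := by
        have hpref := List.takeWhile_prefix (l := cs) (p := fun c => c = 'a')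
        have := List.prefix_iff_eq_take.mp hpref
        rw [htw] at this
        simpa using this.symm
      have hs1 : (cs.drop n).take n = List.replicate n 'b' := by
        have := h1
        rw [PySem.List.slice_natCast] at this
        simpa [show 2 * n - n = n by omega] using this
      have hs2 : cs.drop (2 * n) = List.replicate n 'c' := by
        have := h2
        rw [PySem.List.slice_natCast] at this
        have hlen : (cs.drop (2 * n)).length = n := by
          rw [List.length_drop]; omega
        rw [show 3 * n - 2 * n = n by omega] at this
        rw [List.take_of_length_le (le_of_eq hlen)] at this
        exact this
      have hpos : 1 ≤ n := by
        obtain ⟨c0, rest, rfl⟩ := List.exists_cons_of_ne_nil hne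
        have hc0 : c0 = 'a' := by simpa [PySem.List.pyGet?, PySem.List.pyIdx?] using hget
        rw [hnt, hc0]
        simp
      refine ⟨n, hpos, ?_⟩
      calc cs = cs.take n ++ cs.drop n := (List.take_append_drop n cs).symm
        _ = cs.take n ++ ((cs.drop n).take n ++ (cs.drop n).drop n) := by
              congr 1
              exact (List.take_append_drop n _).symm
        _ = List.replicate n 'a' ++ List.replicate n 'b' ++ List.replicate n 'c' := by
              rw [htake, hs1, List.drop_drop, show n + n = 2 * n by omega, hs2]
              simp [List.append_assoc]
  · rintro ⟨n, hn, rfl⟩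
    obtain ⟨m, rfl⟩ : ∃ m, n = m + 1 := ⟨n - 1, by omega⟩
    set n := m + 1 with hnm
    set cs := List.replicate n 'a' ++ List.replicate n 'b' ++ List.replicate n 'c' with hcs
    have hhead : cs = 'a' :: (List.replicate m 'a' ++ List.replicate n 'b' ++ List.replicate n 'c') := by
      rw [hcs, hnm]
      simp [List.replicate_succ]
    have hwhile : pvWhileA cs 0 = n := by
      rw [pvWhileA_eq_takeWhile]
      simp only [List.drop_zero, Nat.zero_add]
      rw [hcs, List.append_assoc,
        pvTakeWhile_replicate_append _ 'a' (by simp) n]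
      rw [hnm]
      simp [List.replicate_succ]
    have hdropn : cs.drop n = List.replicate n 'b' ++ List.replicate n 'c' := by
      rw [hcs, List.append_assoc]
      exact List.drop_left' (by simp)
    have hs1 : PySem.List.slice cs (some (n : Int)) (some ((2 * n : Nat) : Int))
        = List.replicate n 'b' := by
      rw [PySem.List.slice_natCast, hdropn, show 2 * n - n = n by omega]
      exact List.take_left' (by simp)
    have hs2 : PySem.List.slice cs (some ((2 * n : Nat) : Int)) (some ((3 * n : Nat) : Int))
        = List.replicate n 'c' := by
      rw [PySem.List.slice_natCast, show 2 * n = n + n by omega, ← List.drop_drop, hdropn,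
        List.drop_left' (l₁ := List.replicate n 'b') (by simp),
        show 3 * n - (n + n) = n by omega]
      exact List.take_of_length_le (by simp)
    have hlen : cs.length = 3 * n := by rw [hcs]; simp; omega
    have hne : cs.isEmpty = false := by rw [hhead]; rfl
    have hget : PySem.List.pyGet? cs 0 = some 'a' := by
      rw [hhead]
      simp [PySem.List.pyGet?, PySem.List.pyIdx?]
      rw [if_pos (by positivity)]
      simp
    simp only [pvA, hne, hget, hwhile, hs1, hs2, hlen]
    simp

theorem B_iff (cs : List Char) : pvB cs = true ↔ pvIsABC cs := by
  constructor
  · intro h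
    simp only [pvB, Bool.and_eq_true, decide_eq_true_eq] at h
    obtain ⟨⟨hlen, hfst⟩, hset⟩ := h
    obtain ⟨p1, p2, p3, hruns⟩ := List.length_eq_three.mp hlen
    obtain ⟨c1, n1⟩ := p1
    obtain ⟨c2, n2⟩ := p2
    obtain ⟨c3, n3⟩ := p3
    rw [hruns] at hfst hset
    simp only [List.map_cons, List.map_nil, List.cons.injEq, and_true] at hfst
    obtain ⟨rfl, rfl, rfl⟩ := hfst
    obtain ⟨h21, h31⟩ := (pvSet3_len_one n1 n2 n3).mp (by simpa using hset)
    have hexp : pvExpand (pvRle cs) = cs := by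
      have := pvExpand_foldl cs []
      simpa [pvRle, pvExpand] using this
    have hpos : 1 ≤ n1 := by
      have := pvRle_pos cs [] (by simp) ('a', n1) (by rw [show cs.foldl pvRleStep [] = pvRle cs from rfl, hruns]; simp)
      simpa using this
    refine ⟨n1, hpos, ?_⟩
    rw [← hexp, hruns]
    simp [pvExpand, h21, h31]
  · rintro ⟨n, hn, rfl⟩
    simp only [pvB, pvRle_canon n hn]
    simp [(pvSet3_len_one n n n).mpr ⟨rfl, rfl⟩]

-- ===== VERDICT (by name: the statement is the Claim_ definition above) =====
theorem membership_abc_spec : Claim_equal_membership_abc := by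
  intro s _
  unfold Spec_membership_abc membership_abc membership_abc_alt
  have hA := A_iff s.toList
  have hB := B_iff s.toList
  cases hA' : pvA s.toList <;> cases hB' : pvB s.toList <;> simp_all
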